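-- pv_equiv track=rewrite | github.com/jaytee0x-arch/keno-radar | radar.py | simulate_lives
-- ===== SOURCE A (Python) =====
-- STARTING_LIVES = 2      # Each number begins with this many lives
--
-- def simulate_lives(games_data):
--     """
--     For each frame, compute every number's current life count.
--     Rules:
--       - All 80 numbers start with STARTING_LIVES
--       - Drawn in a game: +1 life
--       - Not drawn in a game: -1 life
--       - Lives floor at 0 (dead = invisible)
--       - No maximum cap
--     """
--     snapshots = []
--     lives = {n: STARTING_LIVES for n in range(1, 81)}
--
--     for game in games_data:
--         drawn = game["numbers"]
--         for n in range(1, 81):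
--             if n in drawn:
--                 lives[n] += 1
--             else:
--                 lives[n] = max(0, lives[n] - 1)
--         # Store a copy of the current state
--         snapshots.append(dict(lives))
--
--     return snapshots
-- ===== SOURCE B (Python) =====
-- STARTING_LIVES = 2
--
--
-- def simulate_lives(games_data):
--     # Closed form for a lower-clamped walk: per number, life after game i equals
--     # p_i + max(STARTING_LIVES, max over misses j<=i of -p_j), where p is the
--     # prefix sum of +1/-1 deltas.  No clamping recurrence is ever applied.
--     snapshots = [{} for _ in games_data]
--     for n in range(1, 81):
--         p = 0
--         m = STARTING_LIVES
--         for snap, game in zip(snapshots, games_data):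
--             if n in game["numbers"]:
--                 p += 1
--             else:
--                 p -= 1
--                 if -p > m:
--                     m = -p
--             snap[n] = p + m
--     return snapshots
-- ===== Notes on version B (the rewrite author's own statement) =====
-- stated objective: alternative
-- what changed: B replaces the clamped recurrence max(0, life-1) by the closed form for a lower-clamped random walk: per number it tracks a prefix sum p of +/-1 deltas and a running maximum m of -p at misses, and each frame's life is simply p + m; no clamping step is ever performed and no state dict is copied per frame.
import Mathlib
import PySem

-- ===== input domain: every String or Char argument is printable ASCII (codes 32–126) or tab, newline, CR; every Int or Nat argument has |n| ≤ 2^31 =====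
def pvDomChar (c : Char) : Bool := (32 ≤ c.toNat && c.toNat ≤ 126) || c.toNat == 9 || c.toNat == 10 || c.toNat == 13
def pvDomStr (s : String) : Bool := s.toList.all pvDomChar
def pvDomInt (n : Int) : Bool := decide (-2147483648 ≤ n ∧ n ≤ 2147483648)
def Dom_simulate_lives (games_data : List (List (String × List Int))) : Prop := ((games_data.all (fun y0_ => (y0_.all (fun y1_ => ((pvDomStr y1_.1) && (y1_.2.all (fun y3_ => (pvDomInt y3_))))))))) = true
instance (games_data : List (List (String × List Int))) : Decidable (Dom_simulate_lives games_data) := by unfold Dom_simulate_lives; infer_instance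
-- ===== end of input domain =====

-- B computes each life by the closed form for a lower-clamped walk (prefix sum + running
-- max of -prefix at misses) instead of A's clamped max(0, life-1) recurrence (alternative).

-- ===== PORT A =====
-- game["numbers"]: getD is exact under Pre_ (key present); Pre_ excludes the KeyError case.
def pvDrawn (game : List (String × List Int)) : List Int :=
  (PySem.Dict.mk game).getD "numbers" []

-- the inner `for n in range(1, 81)` loop of A, updating the lives dict
def pvAStep (lives : PySem.Dict Int Int) (game : List (String × List Int)) : PySem.Dict Int Int :=
  let drawn := pvDrawn game
  (PySem.List.pyRange 1 81 1).foldl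
    (fun d n =>
      if n ∈ drawn then d.modify n 0 (· + 1)
      else d.modify n 0 (fun v => max 0 (v - 1))) lives

def simulate_lives (games_data : List (List (String × List Int))) : List (List (Int × Int)) :=
  let init : PySem.Dict Int Int :=
    PySem.Dict.ofList ((PySem.List.pyRange 1 81 1).map (fun n => (n, 2)))
  (games_data.foldl
    (fun st game =>
      let lives' := pvAStep st.2 game
      (st.1 ++ [lives'.items], lives'))
    (([] : List (List (Int × Int))), init)).1

-- ===== PORT B =====
-- the inner `for snap, game in zip(...)` loop of B for one number n, threading the
-- prefix sum p and the running max m; the recorded life is always p + m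
def pvColStep (n : Int) : Int → Int → List (List (Int × Int) × List (String × List Int)) → List (List (Int × Int))
  | _, _, [] => []
  | p, m, (snap, game) :: rest =>
      if n ∈ pvDrawn game then
        ((PySem.Dict.mk snap).insert n ((p + 1) + m)).items :: pvColStep n (p + 1) m rest
      else
        ((PySem.Dict.mk snap).insert n ((p - 1) + max m (-(p - 1)))).items ::
          pvColStep n (p - 1) (max m (-(p - 1))) rest

def simulate_lives_alt (games_data : List (List (String × List Int))) : List (List (Int × Int)) :=
  (PySem.List.pyRange 1 81 1).foldl
    (fun snapshots n => pvColStep n 0 2 (snapshots.zip games_data))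
    (games_data.map (fun _ => []))

-- ===== PRECONDITION & SPEC =====
-- Pre_ excludes exactly the inputs where A raises KeyError: a game dict without the key "numbers".
def Pre_simulate_lives (games_data : List (List (String × List Int))) : Prop :=
  ∀ game ∈ games_data, "numbers" ∈ game.map Prod.fst
instance (games_data : List (List (String × List Int))) : Decidable (Pre_simulate_lives games_data) := by
  unfold Pre_simulate_lives; infer_instance

def pvWitness_simulate_lives : (List (List (String × List Int))) :=
  [[("numbers", [1, 2, 80])], [("numbers", [])]]

def Spec_simulate_lives (games_data : List (List (String × List Int))) (out : List (List (Int × Int))) : Prop := out = simulate_lives_alt games_data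
instance (games_data : List (List (String × List Int))) (out : List (List (Int × Int))) : Decidable (Spec_simulate_lives games_data out) := by unfold Spec_simulate_lives; infer_instance

-- ===== CLAIM (what is proved, stated in full; the proofs are below) =====
def Claim_equal_simulate_lives : Prop := ∀ (games_data : List (List (String × List Int))), Dom_simulate_lives games_data → Pre_simulate_lives games_data → Spec_simulate_lives games_data (simulate_lives games_data)

-- ===== LEMMAS AND PROOFS =====

-- A's per-number per-game life update (the clamped recurrence)
def pvUpd (drawn : List Int) (n v : Int) : Int :=
  if n ∈ drawn then v + 1 else max 0 (v - 1)

-- common characterisation: frame-by-frame result restricted to the key list ks,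
-- threading the life function f : number → current life
def pvFrames (ks : List Int) (f : Int → Int) : List (List (String × List Int)) → List (List (Int × Int))
  | [] => []
  | g :: gs =>
      (ks.map fun n => (n, pvUpd (pvDrawn g) n (f n))) ::
        pvFrames ks (fun n => pvUpd (pvDrawn g) n (f n)) gs

theorem pvWitness_ok : Dom_simulate_lives pvWitness_simulate_lives ∧ Pre_simulate_lives pvWitness_simulate_lives := by
  constructor <;> decide

-- ---- A side ----

lemma pvAStep_step_eq (drawn : List Int) (d : PySem.Dict Int Int) (n : Int) :
    (if n ∈ drawn then d.modify n 0 (· + 1) else d.modify n 0 (fun v => max 0 (v - 1)))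
      = d.modify n 0 (pvUpd drawn n) := by
  unfold pvUpd; split_ifs <;> rfl

-- folding `modify` over distinct keys of a map-shaped dict rewrites the map pointwise
lemma pvFoldl_modify_map (u : Int → Int → Int) :
    ∀ (ks : List Int) (pre : List (Int × Int)) (f : Int → Int),
      (pre.map Prod.fst ++ ks).Nodup →
      ks.foldl (fun d n => PySem.Dict.modify d n 0 (u n))
        (PySem.Dict.mk (pre ++ ks.map (fun m => (m, f m))))
        = PySem.Dict.mk (pre ++ ks.map (fun m => (m, u m (f m)))) := by
  intro ks
  induction ks with
  | nil => intro pre f _; simp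
  | cons k ks ih =>
    intro pre f hnd
    have hknotpre : k ∉ pre.map Prod.fst := by
      intro h
      exact (List.disjoint_of_nodup_append hnd) h (by simp)
    have hkks : k ∉ ks := by
      have := (List.nodup_append.mp hnd).2.1
      exact (List.nodup_cons.mp this).1
    have hndkeys : (PySem.Dict.mk (pre ++ (k, f k) :: ks.map (fun m => (m, f m)))).keys.Nodup := by
      show (List.map Prod.fst (pre ++ (k, f k) :: ks.map (fun m => (m, f m)))).Nodup
      simpa [PySem.Dict.keys, Function.comp_def] using hnd
    have hmem : (k, f k) ∈ (PySem.Dict.mk (pre ++ (k, f k) :: ks.map (fun m => (m, f m)))).items := by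
      show (k, f k) ∈ pre ++ (k, f k) :: ks.map (fun m => (m, f m))
      simp
    have hget : (PySem.Dict.mk (pre ++ (k, f k) :: ks.map (fun m => (m, f m)))).getD k 0 = f k :=
      PySem.Dict.getD_of_mem_items _ hmem hndkeys 0
    have hcont : (PySem.Dict.mk (pre ++ (k, f k) :: ks.map (fun m => (m, f m)))).contains k = true := by
      rw [PySem.Dict.contains_iff_mem_keys]
      show k ∈ List.map Prod.fst (pre ++ (k, f k) :: ks.map (fun m => (m, f m)))
      simp
    have hins :
        ((PySem.Dict.mk (pre ++ (k, f k) :: ks.map (fun m => (m, f m)))).insert k (u k (f k)))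
          = PySem.Dict.mk (pre ++ (k, u k (f k)) :: ks.map (fun m => (m, f m))) := by
      apply PySem.Dict.ext
      rw [PySem.Dict.items_insert_of_contains _ _ hcont]
      show (pre ++ (k, f k) :: ks.map (fun m => (m, f m))).map
          (fun p => if (p.1 == k) = true then (k, u k (f k)) else p) = _
      rw [List.map_append, List.map_cons]
      have hpre : pre.map (fun p => if (p.1 == k) = true then (k, u k (f k)) else p) = pre := by
        calc pre.map (fun p => if (p.1 == k) = true then (k, u k (f k)) else p)
            = pre.map id := List.map_congr_left (by
                intro p hp
                have hne : p.1 ≠ k := fun h => hknotpre (h ▸ List.mem_map_of_mem hp)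
                simp [hne])
          _ = pre := List.map_id pre
      have hrest : (ks.map (fun m => (m, f m))).map
            (fun p => if (p.1 == k) = true then (k, u k (f k)) else p)
          = ks.map (fun m => (m, f m)) := by
        rw [List.map_map]
        apply List.map_congr_left
        intro m hm
        have hne : m ≠ k := fun h => hkks (h ▸ hm)
        simp [hne]
      rw [hpre, hrest]
      simp
    calc (k :: ks).foldl (fun d n => PySem.Dict.modify d n 0 (u n))
          (PySem.Dict.mk (pre ++ (k :: ks).map (fun m => (m, f m))))
        = ks.foldl (fun d n => PySem.Dict.modify d n 0 (u n))
            (PySem.Dict.mk ((pre ++ [(k, u k (f k))]) ++ ks.map (fun m => (m, f m)))) := by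
          simp only [List.foldl_cons, List.map_cons]
          congr 1
          show (PySem.Dict.mk (pre ++ (k, f k) :: ks.map (fun m => (m, f m)))).insert k
              (u k ((PySem.Dict.mk (pre ++ (k, f k) :: ks.map (fun m => (m, f m)))).getD k 0)) = _
          rw [hget, hins]
          congr 1
          exact List.append_cons _ _ _
      _ = PySem.Dict.mk ((pre ++ [(k, u k (f k))]) ++ ks.map (fun m => (m, u m (f m)))) := by
          apply ih
          simpa using hnd
      _ = PySem.Dict.mk (pre ++ (k :: ks).map (fun m => (m, u m (f m)))) := by
          simp

def pvR : List Int := PySem.List.pyRange 1 81 1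

lemma pvR_nodup : pvR.Nodup := by decide

lemma pvAStep_map (f : Int → Int) (g : List (String × List Int)) :
    pvAStep (PySem.Dict.mk (pvR.map (fun m => (m, f m)))) g
      = PySem.Dict.mk (pvR.map (fun m => (m, pvUpd (pvDrawn g) m (f m)))) := by
  unfold pvAStep
  simp only [pvAStep_step_eq]
  have := pvFoldl_modify_map (pvUpd (pvDrawn g)) pvR [] f (by simpa using pvR_nodup)
  simpa using this

lemma pvA_char :
    ∀ (gs : List (List (String × List Int))) (acc : List (List (Int × Int))) (f : Int → Int),
      (gs.foldl (fun st game =>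
          let lives' := pvAStep st.2 game
          (st.1 ++ [lives'.items], lives'))
        (acc, PySem.Dict.mk (pvR.map (fun m => (m, f m))))).1
        = acc ++ pvFrames pvR f gs := by
  intro gs
  induction gs with
  | nil => intro acc f; simp [pvFrames]
  | cons g gs ih =>
    intro acc f
    simp only [List.foldl_cons, pvAStep_map, pvFrames]
    rw [ih]
    simp

set_option maxRecDepth 8192 in
lemma pvA_eq (games_data : List (List (String × List Int))) :
    simulate_lives games_data = pvFrames pvR (fun _ => 2) games_data := by
  unfold simulate_lives
  have hinit : PySem.Dict.ofList ((PySem.List.pyRange 1 81 1).map (fun n => (n, (2 : Int))))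
      = PySem.Dict.mk (pvR.map (fun m => (m, 2))) := by decide
  simp only [hinit]
  have := pvA_char games_data [] (fun _ => 2)
  simpa using this

-- ---- B side ----

-- key invariant: if the current life equals p + m with m ≥ 0, B's closed-form column
-- reproduces A's clamped column
lemma pvColStep_frames (n : Int) :
    ∀ (gs : List (List (String × List Int))) (ks : List Int) (f : Int → Int) (p m : Int),
      f n = p + m → 0 ≤ m → n ∉ ks →
      pvColStep n p m ((pvFrames ks f gs).zip gs)
        = pvFrames (ks ++ [n]) f gs := by
  intro gs
  induction gs with
  | nil => intro ks f p m _ _ _; simp [pvFrames, pvColStep]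
  | cons g gs ih =>
    intro ks f p m hf hm hn
    simp only [pvFrames, List.zip_cons_cons, pvColStep]
    have hcont : (PySem.Dict.mk (ks.map fun k => (k, pvUpd (pvDrawn g) k (f k)))).contains n = false := by
      rw [← Bool.not_eq_true, PySem.Dict.contains_iff_mem_keys]
      show ¬ n ∈ List.map Prod.fst (ks.map fun k => (k, pvUpd (pvDrawn g) k (f k)))
      simpa using hn
    have hhead : ∀ v : Int,
        ((PySem.Dict.mk (ks.map fun k => (k, pvUpd (pvDrawn g) k (f k)))).insert n v).items
          = (ks.map fun k => (k, pvUpd (pvDrawn g) k (f k))) ++ [(n, v)] := by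
      intro v
      rw [PySem.Dict.items_insert_of_not_contains _ _ hcont]
    by_cases hd : n ∈ pvDrawn g
    · simp only [if_pos hd, hhead]
      have hv : pvUpd (pvDrawn g) n (f n) = (p + 1) + m := by
        unfold pvUpd; rw [if_pos hd, hf]; ring
      congr 1
      · rw [List.map_append, ← hv]
        rfl
      · exact ih ks (fun k => pvUpd (pvDrawn g) k (f k)) (p + 1) m
          hv hm hn
    · simp only [if_neg hd, hhead]
      have hv : pvUpd (pvDrawn g) n (f n) = (p - 1) + max m (-(p - 1)) := by
        unfold pvUpd; rw [if_neg hd, hf]; omega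
      congr 1
      · rw [List.map_append, ← hv]
        rfl
      · exact ih ks (fun k => pvUpd (pvDrawn g) k (f k)) (p - 1) (max m (-(p - 1)))
          hv (by omega) hn

lemma pvFrames_nil_keys (f : Int → Int) :
    ∀ gs : List (List (String × List Int)), pvFrames [] f gs = gs.map (fun _ => []) := by
  intro gs
  induction gs generalizing f with
  | nil => rfl
  | cons g gs ih => simp [pvFrames, ih]

lemma pvB_fold :
    ∀ (ks₂ ks₁ : List Int) (gs : List (List (String × List Int))),
      (ks₁ ++ ks₂).Nodup →
      ks₂.foldl (fun snapshots n => pvColStep n 0 2 (snapshots.zip gs))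
          (pvFrames ks₁ (fun _ => 2) gs)
        = pvFrames (ks₁ ++ ks₂) (fun _ => 2) gs := by
  intro ks₂
  induction ks₂ with
  | nil => intro ks₁ gs _; simp
  | cons n ks ih =>
    intro ks₁ gs hnd
    have hn : n ∉ ks₁ := by
      intro h
      exact (List.disjoint_of_nodup_append hnd) h (by simp)
    simp only [List.foldl_cons]
    rw [pvColStep_frames n gs ks₁ (fun _ => 2) 0 2 rfl (by norm_num) hn]
    rw [ih (ks₁ ++ [n]) gs (by simpa using hnd)]
    simp

lemma pvB_eq (games_data : List (List (String × List Int))) :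
    simulate_lives_alt games_data = pvFrames pvR (fun _ => 2) games_data := by
  unfold simulate_lives_alt
  have h0 : games_data.map (fun _ => ([] : List (Int × Int)))
      = pvFrames [] (fun _ => 2) games_data := (pvFrames_nil_keys _ _).symm
  show (PySem.List.pyRange 1 81 1).foldl _ (games_data.map fun _ => []) = _
  rw [h0]
  have := pvB_fold pvR [] games_data (by simpa using pvR_nodup)
  simpa using this

-- ===== VERDICT (by name: the statement is the Claim_ definition above) =====
theorem simulate_lives_spec : Claim_equal_simulate_lives := by
  intro games_data _ _
  show simulate_lives games_data = simulate_lives_alt games_data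
  rw [pvA_eq, pvB_eq]
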